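-- pv_equiv track=rewrite | github.com/gkepka/island-model | src/diversity/diversity.py | get_l1_diversity
-- ===== SOURCE A (Python) =====
-- def get_l1_diversity(population):
--     def get_sum_of_differences(index):
--         arr = sorted(map(lambda x: x[index], population))
--         total = 0
--         arr_sum = 0
--         for i in range(len(arr)):
--             total += (arr[i] * i - arr_sum)
--             arr_sum += arr[i]
--         return total
--
--     diversity = 0
--     ind_size = len(population[0])
--     for i in range(ind_size):
--         diversity += get_sum_of_differences(i)
--     return diversity
-- ===== SOURCE B (Python) =====
-- def get_l1_diversity(population):
--     total = 0
--     for i in range(len(population[0])):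
--         col = [row[i] for row in population]
--         while col:
--             x = col[0]
--             col = col[1:]
--             for y in col:
--                 total += abs(x - y)
--     return total
-- ===== Notes on version B (the rewrite author's own statement) =====
-- stated objective: simpler
-- what changed: Replaces the per-dimension sort + running prefix-sum trick with the direct definition: sum |x-y| over all unordered pairs in each column, no sorting and no auxiliary running sum.
import Mathlib
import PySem

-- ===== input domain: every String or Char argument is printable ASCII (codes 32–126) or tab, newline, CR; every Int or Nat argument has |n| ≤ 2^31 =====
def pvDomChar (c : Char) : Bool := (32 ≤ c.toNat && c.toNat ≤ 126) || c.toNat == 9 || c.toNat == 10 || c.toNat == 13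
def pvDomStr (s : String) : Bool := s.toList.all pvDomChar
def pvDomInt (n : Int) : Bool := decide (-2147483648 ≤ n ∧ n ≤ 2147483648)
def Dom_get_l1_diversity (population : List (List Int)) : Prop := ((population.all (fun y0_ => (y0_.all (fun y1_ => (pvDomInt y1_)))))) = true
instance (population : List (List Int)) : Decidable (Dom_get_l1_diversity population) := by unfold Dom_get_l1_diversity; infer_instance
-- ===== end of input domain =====

-- B replaces A's per-dimension sort + prefix-sum trick by the direct all-unordered-pairs
-- sum of |x - y| in each column: simpler (no sort, no running sum), same exact Int result.

-- ===== PORT A =====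
-- inner helper get_sum_of_differences(index), inlined over the already-extracted column
def pvSumOfDifferences (col : List Int) : Int :=
  let arr := PySem.List.sorted col (fun x => x) false
  ((PySem.List.pyRange 0 (arr.length : Int) 1).foldl
    (fun (st : Int × Int) i =>
      (st.1 + (PySem.List.pyGetD arr i 0 * i - st.2), st.2 + PySem.List.pyGetD arr i 0))
    (0, 0)).1

def get_l1_diversity (population : List (List Int)) : Int :=
  let ind_size := (population.headD []).length
  (PySem.List.pyRange 0 (ind_size : Int) 1).foldl
    (fun diversity i =>
      diversity + pvSumOfDifferences (population.map (fun row => PySem.List.pyGetD row i 0)))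
    0

-- ===== PORT B =====
-- the 'while col: x = col[0]; col = col[1:]; for y in col: total += abs(x - y)' loop
def pvPairLoop (total : Int) : List Int → Int
  | [] => total
  | x :: rest => pvPairLoop (rest.foldl (fun t y => t + |x - y|) total) rest

def get_l1_diversity_alt (population : List (List Int)) : Int :=
  (PySem.List.pyRange 0 (((population.headD []).length : Int)) 1).foldl
    (fun total i =>
      pvPairLoop total (population.map (fun row => PySem.List.pyGetD row i 0)))
    0

-- ===== PRECONDITION & SPEC =====
-- Pre_ excludes exactly the inputs where the Python A raises IndexError:
-- empty population (population[0]) and rows shorter than the first row (x[index]).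
def Pre_get_l1_diversity (population : List (List Int)) : Prop :=
  population ≠ [] ∧ ∀ row ∈ population, (population.headD []).length ≤ row.length
instance (population : List (List Int)) : Decidable (Pre_get_l1_diversity population) := by
  unfold Pre_get_l1_diversity; infer_instance

def pvWitness_get_l1_diversity : List (List Int) := [[1, 3], [2, 0]]

def Spec_get_l1_diversity (population : List (List Int)) (out : Int) : Prop :=
  out = get_l1_diversity_alt population
instance (population : List (List Int)) (out : Int) : Decidable (Spec_get_l1_diversity population out) := by
  unfold Spec_get_l1_diversity; infer_instance

-- ===== CLAIM (what is proved, stated in full; the proofs are below) =====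
def Claim_equal_get_l1_diversity : Prop := ∀ (population : List (List Int)), Dom_get_l1_diversity population → Pre_get_l1_diversity population → Spec_get_l1_diversity population (get_l1_diversity population)

-- ===== LEMMAS AND PROOFS =====

-- sum over later-minus-earlier differences, structurally
def pvPairsDiff : List Int → Int
  | [] => 0
  | x :: t => (t.map (fun y => y - x)).sum + pvPairsDiff t

-- sum over |difference| of all unordered pairs, structurally
def pvPairsAbs : List Int → Int
  | [] => 0
  | x :: t => (t.map (fun y => |x - y|)).sum + pvPairsAbs t

theorem pvPairLoop_eq (l : List Int) : ∀ total : Int, pvPairLoop total l = total + pvPairsAbs l := by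
  induction l with
  | nil => intro total; simp [pvPairLoop, pvPairsAbs]
  | cons x t ih =>
    intro total
    rw [pvPairLoop, ih, PySem.List.foldl_add, pvPairsAbs]
    ring

theorem pvPairsDiff_append (l : List Int) (a : Int) :
    pvPairsDiff (l ++ [a]) = pvPairsDiff l + (a * l.length - l.sum) := by
  induction l with
  | nil => simp [pvPairsDiff]
  | cons x t ih =>
    simp only [List.cons_append, pvPairsDiff, List.map_append, List.sum_append,
      List.map_cons, List.map_nil, List.sum_cons, List.sum_nil, ih,
      List.length_cons, List.sum_cons]
    push_cast
    ring

theorem pvLoopA_eq (arr : List Int) :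
    ((PySem.List.pyRange 0 (arr.length : Int) 1).foldl
      (fun (st : Int × Int) i =>
        (st.1 + (PySem.List.pyGetD arr i 0 * i - st.2), st.2 + PySem.List.pyGetD arr i 0))
      (0, 0)) = (pvPairsDiff arr, arr.sum) := by
  induction arr using List.reverseRecOn with
  | nil => simp [PySem.List.pyRange_one_eq_nil, pvPairsDiff]
  | append_singleton l a ih =>
    have hlen : (((l ++ [a]).length : Int)) = (l.length : Int) + 1 := by
      simp
    rw [hlen, PySem.List.pyRange_one_succ_right (by positivity), List.foldl_append]
    have hpref :
        ((PySem.List.pyRange 0 (l.length : Int) 1).foldl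
          (fun (st : Int × Int) i =>
            (st.1 + (PySem.List.pyGetD (l ++ [a]) i 0 * i - st.2),
             st.2 + PySem.List.pyGetD (l ++ [a]) i 0)) (0, 0)) = (pvPairsDiff l, l.sum) := by
      rw [← ih]
      apply PySem.List.foldl_congr_mem
      intro st i hi
      have hmem := (PySem.List.mem_pyRange_one).1 hi
      have h1 : PySem.List.pyGetD (l ++ [a]) i 0 = PySem.List.pyGetD l i 0 := by
        rw [PySem.List.pyGetD_eq_getElem _ _ hmem.1 (by simp; omega),
            PySem.List.pyGetD_eq_getElem _ _ hmem.1 (by simpa using hmem.2),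
            List.getElem_append_left]
      rw [h1]
    rw [hpref]
    simp only [List.foldl_cons, List.foldl_nil]
    have ha : PySem.List.pyGetD (l ++ [a]) (l.length : Int) 0 = a := by
      rw [PySem.List.pyGetD_eq_getElem _ _ (by positivity) (by simp)]
      simp
    rw [ha, pvPairsDiff_append]
    simp only [Prod.mk.injEq, List.sum_append, List.sum_cons, List.sum_nil]
    exact ⟨trivial, by push_cast; ring⟩

theorem pvPairsDiff_eq_abs (l : List Int) (h : l.Pairwise (· ≤ ·)) :
    pvPairsDiff l = pvPairsAbs l := by
  induction l with
  | nil => rfl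
  | cons x t ih =>
    rw [List.pairwise_cons] at h
    rw [pvPairsDiff, pvPairsAbs, ih h.2]
    congr 1
    apply congrArg
    apply List.map_congr_left
    intro y hy
    have := h.1 y hy
    rw [abs_of_nonpos (by omega)]
    ring

theorem pvPairsAbs_perm {l l' : List Int} (h : l.Perm l') : pvPairsAbs l = pvPairsAbs l' := by
  induction h with
  | nil => rfl
  | cons x h ih =>
    rw [pvPairsAbs, pvPairsAbs, ih, (h.map (fun y => |x - y|)).sum_eq]
  | swap x y l =>
    simp only [pvPairsAbs, List.map_cons, List.sum_cons]
    rw [abs_sub_comm]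
    ring
  | trans _ _ ih1 ih2 => rw [ih1, ih2]

theorem pvSumOfDifferences_eq (col : List Int) : pvSumOfDifferences col = pvPairsAbs col := by
  rw [pvSumOfDifferences]
  simp only [pvLoopA_eq]
  rw [pvPairsDiff_eq_abs _ (by simpa using PySem.List.sorted_pairwise col (fun x => x) )]
  exact pvPairsAbs_perm (PySem.List.sorted_perm col (fun x => x) false)

-- ===== VERDICT (by name: the statement is the Claim_ definition above) =====
theorem get_l1_diversity_spec : Claim_equal_get_l1_diversity := by
  intro population _ _
  unfold Spec_get_l1_diversity get_l1_diversity get_l1_diversity_alt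
  apply PySem.List.foldl_congr_mem
  intro d i _
  rw [pvPairLoop_eq, pvSumOfDifferences_eq]
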